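-- pv_equiv track=rewrite | github.com/mkierc/advent-of-code | 2024/src/day_25/part_1.py | pair_locks
-- ===== SOURCE A (Python) =====
-- def pair_locks(keys, locks):
--     paired_sum = 0
--     for key in keys:
--         for lock in locks:
--             # key does NOT have to match exactly to the lock...
--             # if not (lock == invert_key_to_lock(key)):
--             match = True
--             for i in range(len(lock)):
--                 for j in range(len(lock[0])):
--                     if not ((lock[i][j] == '#' and key[i][j] == '.')
--                             or (lock[i][j] == '.' and lock[i][j] == '.')):
--                         match = False
--                         break
--             if match:
--                 paired_sum += 1
--     return paired_sum
-- ===== SOURCE B (Python) =====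
-- def pair_locks(keys, locks):
--     # normalize each lock once into its demand list: the occupied cells of its
--     # len(lock) x len(lock[0]) grid; a lock fits a key when every demanded cell
--     # is a pin resting on an empty key cell
--     demands = []
--     for lock in locks:
--         cols = len(lock[0]) if lock else 0
--         demands.append([(i, j, c) for i, row in enumerate(lock)
--                         for j, c in enumerate(row[:cols]) if c != '.'])
--     count = 0
--     for key in keys:
--         count += sum(1 for d in demands
--                      if all(c == '#' and key[i][j] == '.' for i, j, c in d))
--     return count
-- ===== Notes on version B (the rewrite author's own statement) =====
-- stated objective: faster
-- what changed: A rescans every cell of every lock against every key in a quadruple nested loop; B normalizes each lock once into a sparse demand list of its occupied (non-'.') cells and checks each key/lock pair against that list alone, so the per-pair full-grid scan disappears. Pre_ excludes exactly the inputs on which A raises IndexError.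
import Mathlib
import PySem

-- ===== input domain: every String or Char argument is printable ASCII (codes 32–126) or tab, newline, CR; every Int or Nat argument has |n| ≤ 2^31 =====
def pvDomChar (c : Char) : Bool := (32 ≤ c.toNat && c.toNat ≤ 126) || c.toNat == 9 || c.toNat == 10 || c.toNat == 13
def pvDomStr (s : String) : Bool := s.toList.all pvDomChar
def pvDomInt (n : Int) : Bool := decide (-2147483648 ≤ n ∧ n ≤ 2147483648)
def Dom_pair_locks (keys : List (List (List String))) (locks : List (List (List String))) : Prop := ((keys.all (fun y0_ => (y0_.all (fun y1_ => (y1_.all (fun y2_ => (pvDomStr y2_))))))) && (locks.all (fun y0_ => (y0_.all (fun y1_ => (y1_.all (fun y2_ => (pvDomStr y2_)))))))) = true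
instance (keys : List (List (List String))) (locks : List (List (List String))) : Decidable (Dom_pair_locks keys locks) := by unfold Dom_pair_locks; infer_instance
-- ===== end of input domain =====

-- B normalizes each lock once into a sparse list of its occupied cells and checks each
-- key/lock pair against that list alone (objective: the per-pair full-grid rescan disappears).

-- ===== PORT A =====
-- cell access lock[i][j] / key[i][j]: Pre_ guarantees every access the Python performs
-- is in range, and the loop stops (break / short-circuit) before any other, so getD is exact
def pvCellCond (lock key : List (List String)) (i j : Nat) : Bool :=
  (((lock.getD i []).getD j "" == "#") && ((key.getD i []).getD j "" == ".")) ||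
  (((lock.getD i []).getD j "" == ".") && ((lock.getD i []).getD j "" == "."))

-- the inner 'for j' loop with its break
def pvInnerA (lock key : List (List String)) (i : Nat) : List Nat → Bool → Bool
  | [], m => m
  | j :: js, m =>
    if pvCellCond lock key i j then pvInnerA lock key i js m else false

def pvMatchA (key lock : List (List String)) : Bool :=
  (List.range lock.length).foldl
    (fun m i => pvInnerA lock key i (List.range (lock.getD 0 []).length) m) true

def pair_locks (keys : List (List (List String))) (locks : List (List (List String))) : Int :=
  keys.foldl (fun acc key =>
    locks.foldl (fun acc lock => if pvMatchA key lock then acc + 1 else acc) acc) 0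

-- ===== PORT B =====
-- the demand list of one lock: its non-'.' cells (i, j, c) over rows × len(lock[0])
def pvDemands (lock : List (List String)) : List (Int × Int × String) :=
  let cols := (lock.getD 0 []).length
  (PySem.List.enumerate lock).flatMap (fun p =>
    (PySem.List.enumerate (p.2.take cols)).filterMap (fun q =>
      if q.2 != "." then some (p.1, q.1, q.2) else none))

-- all(c == '#' and key[i][j] == '.' for i, j, c in d); key access in range under Pre_
def pvFitsB (key : List (List String)) (d : List (Int × Int × String)) : Bool :=
  d.all (fun t => t.2.2 == "#" &&
    (PySem.List.pyGetD (PySem.List.pyGetD key t.1 []) t.2.1 "" == "."))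

def pair_locks_alt (keys : List (List (List String))) (locks : List (List (List String))) : Int :=
  let demands := locks.map pvDemands
  keys.foldl (fun count key =>
    count + demands.foldl (fun s d => if pvFitsB key d then s + 1 else s) 0) 0

-- ===== PRECONDITION & SPEC =====
-- the cell scan of row i of a lock passes cell j' and moves on (no break, no IndexError)
def pvPass (key lock : List (List String)) (i j' : Nat) : Prop :=
  j' < (lock.getD i []).length ∧
  ((lock.getD i []).getD j' "" = "." ∨
   ((lock.getD i []).getD j' "" = "#" ∧ i < key.length ∧
    j' < (key.getD i []).length ∧ (key.getD i []).getD j' "" = "."))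

-- every index A's scan dereferences at cell (i, j) exists
def pvInB (key lock : List (List String)) (i j : Nat) : Prop :=
  j < (lock.getD i []).length ∧
  ((lock.getD i []).getD j "" = "#" → i < key.length ∧ j < (key.getD i []).length)

-- exactly the inputs on which A returns (no IndexError): whenever the scan of a pair
-- reaches cell (i, j) — all earlier cells of the row passed — that cell's accesses are in range
def Pre_pair_locks (keys : List (List (List String))) (locks : List (List (List String))) : Prop :=
  ∀ key ∈ keys, ∀ lock ∈ locks, ∀ i < lock.length, ∀ j < (lock.getD 0 []).length,
    (∀ j' < j, pvPass key lock i j') → pvInB key lock i j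
instance (keys : List (List (List String))) (locks : List (List (List String))) : Decidable (Pre_pair_locks keys locks) := by
  unfold Pre_pair_locks
  haveI : ∀ (key lock : List (List String)) (i j' : Nat), Decidable (pvPass key lock i j') :=
    fun key lock i j' => by unfold pvPass; infer_instance
  haveI : ∀ (key lock : List (List String)) (i j : Nat), Decidable (pvInB key lock i j) :=
    fun key lock i j => by unfold pvInB; infer_instance
  infer_instance

def pvWitness_pair_locks : List (List (List String)) × List (List (List String)) :=
  ([[[".", "#"], ["#", "."]]], [[["#", "."], [".", "."]]])

def Spec_pair_locks (keys : List (List (List String))) (locks : List (List (List String))) (out : Int) : Prop := out = pair_locks_alt keys locks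
instance (keys : List (List (List String))) (locks : List (List (List String))) (out : Int) : Decidable (Spec_pair_locks keys locks out) := by unfold Spec_pair_locks; infer_instance

-- ===== CLAIM (what is proved, stated in full; the proofs are below) =====
def Claim_equal_pair_locks : Prop := ∀ (keys : List (List (List String))) (locks : List (List (List String))), Dom_pair_locks keys locks → Pre_pair_locks keys locks → Spec_pair_locks keys locks (pair_locks keys locks)

-- ===== LEMMAS AND PROOFS =====

theorem pvInnerA_eq_all (lock key : List (List String)) (i : Nat) :
    ∀ (js : List Nat) (m : Bool),
      pvInnerA lock key i js m = (m && js.all (fun j => pvCellCond lock key i j)) := by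
  intro js
  induction js with
  | nil => intro m; simp [pvInnerA]
  | cons j js ih =>
    intro m
    simp only [pvInnerA, List.all_cons]
    by_cases h : pvCellCond lock key i j = true
    · simp [h, ih]
    · simp [h]

theorem foldl_and_all {α : Type} (f : α → Bool) :
    ∀ (l : List α) (b : Bool), l.foldl (fun m i => m && f i) b = (b && l.all f) := by
  intro l
  induction l with
  | nil => intro b; simp
  | cons x xs ih => intro b; simp [List.foldl_cons, ih, Bool.and_assoc]

theorem pvMatchA_eq_all (key lock : List (List String)) :
    pvMatchA key lock =
      (List.range lock.length).all (fun i =>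
        (List.range (lock.getD 0 []).length).all (fun j => pvCellCond lock key i j)) := by
  unfold pvMatchA
  rw [PySem.List.foldl_congr_mem _ _
    (fun m i => m && (List.range (lock.getD 0 []).length).all (fun j => pvCellCond lock key i j))
    true (by intro acc x _; exact pvInnerA_eq_all lock key x _ acc)]
  rw [foldl_and_all]
  simp

theorem mem_demands (lock : List (List String)) (t : Int × Int × String) :
    t ∈ pvDemands lock ↔
    ∃ (i : Nat) (hi : i < lock.length) (j : Nat) (_ : j < (lock.getD 0 []).length)
      (hjl : j < lock[i].length),
      lock[i][j] ≠ "." ∧ t = ((i : Int), (j : Int), lock[i][j]) := by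
  unfold pvDemands
  simp only [List.mem_flatMap, List.mem_filterMap, PySem.List.mem_enumerate_iff]
  constructor
  · rintro ⟨p, ⟨i, hi, rfl⟩, q, ⟨j, hj, rfl⟩, hx⟩
    simp only [List.length_take] at hj
    have hjc : j < (lock.getD 0 []).length := by omega
    have hjl : j < lock[i].length := by omega
    simp only [List.getElem_take] at hx
    by_cases h : lock[i][j] = "."
    · simp [h] at hx
    · refine ⟨i, hi, j, hjc, hjl, h, ?_⟩
      simp [h] at hx
      simp [← hx]
  · rintro ⟨i, hi, j, hjc, hjl, h, rfl⟩
    refine ⟨(0 + (i : Int), lock[i]), ⟨i, hi, rfl⟩,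
      (0 + (j : Int), (lock[i].take (lock.getD 0 []).length)[j]'(by simp only [List.length_take]; omega)),
      ⟨j, by simp only [List.length_take]; omega, rfl⟩, ?_⟩
    simp [List.getElem_take, h]

-- a '.'-valued key read through the defaults was a real in-range read ('.' ≠ the default "")
theorem keyDot_inrange (key : List (List String)) (i j : Nat)
    (h : (key.getD i []).getD j "" = ".") :
    i < key.length ∧ j < (key.getD i []).length ∧ (key.getD i []).getD j "" = "." := by
  rcases Nat.lt_or_ge i key.length with hik | hik
  · rcases Nat.lt_or_ge j (key.getD i []).length with hjk | hjk
    · exact ⟨hik, hjk, h⟩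
    · rw [List.getD_eq_default _ _ hjk] at h; simp at h
  · rw [List.getD_eq_default _ _ hik] at h; simp at h

-- the per-pair equivalence, under Pre_'s per-pair safety condition
theorem pvMatch_equiv (key lock : List (List String))
    (hsafe : ∀ i < lock.length, ∀ j < (lock.getD 0 []).length,
      (∀ j' < j, pvPass key lock i j') → pvInB key lock i j) :
    pvMatchA key lock = pvFitsB key (pvDemands lock) := by
  rw [pvMatchA_eq_all]
  unfold pvFitsB
  rw [Bool.eq_iff_iff]
  simp only [List.all_eq_true, List.mem_range, mem_demands]
  constructor
  · rintro H t ⟨i, hi, j, hjC, hjl, hne, rfl⟩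
    have hB := H i hi j hjC
    unfold pvCellCond at hB
    rw [List.getD_eq_getElem lock [] hi, List.getD_eq_getElem lock[i] "" hjl] at hB
    simp only [PySem.List.pyGetD_natCast]
    simp only [Bool.or_eq_true, Bool.and_eq_true, beq_iff_eq] at hB
    rcases hB with ⟨hs, hk⟩ | ⟨hd, _⟩
    · simp only [List.getD_eq_getElem?_getD] at hk
      simp [hs, hk]
    · exact absurd hd hne
  · intro H i hi
    -- every cell of row i passes, by strong induction along the row
    have hpassAll : ∀ j < (lock.getD 0 []).length, pvPass key lock i j := by
      intro j
      induction j using Nat.strong_induction_on with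
      | _ j IH =>
        intro hjC
        have hinb := hsafe i hi j hjC (fun j' hj' => IH j' hj' (by omega))
        have hjl : j < lock[i].length := by
          have := hinb.1; rwa [List.getD_eq_getElem lock [] hi] at this
        unfold pvPass
        rw [List.getD_eq_getElem lock [] hi, List.getD_eq_getElem lock[i] "" hjl]
        refine ⟨hjl, ?_⟩
        by_cases hd : lock[i][j] = "."
        · exact Or.inl hd
        · have ht := H ((i : Int), (j : Int), lock[i][j]) ⟨i, hi, j, hjC, hjl, hd, rfl⟩
          simp only [PySem.List.pyGetD_natCast, Bool.and_eq_true, beq_iff_eq] at ht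
          obtain ⟨hs, hk⟩ := ht
          obtain ⟨hik, hjk, hv⟩ := keyDot_inrange key i j hk
          exact Or.inr ⟨hs, hik, hjk, hv⟩
    intro j hjC
    have hp := hpassAll j hjC
    unfold pvPass at hp
    rw [List.getD_eq_getElem lock [] hi] at hp
    unfold pvCellCond
    rw [List.getD_eq_getElem lock [] hi]
    have hp2 := hp.2
    simp only [List.getD_eq_getElem?_getD] at hp2
    rcases hp2 with hd | ⟨hs, _, _, hk⟩
    · simp [hd]
    · simp [hs, hk]

theorem foldl_count_shift {α : Type} (p : α → Bool) :
    ∀ (l : List α) (a : Int),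
      l.foldl (fun s x => if p x then s + 1 else s) a =
        a + l.foldl (fun s x => if p x then s + 1 else s) 0 := by
  intro l
  induction l with
  | nil => intro a; simp
  | cons x xs ih =>
    intro a
    simp only [List.foldl_cons]
    rw [ih (if p x = true then a + 1 else a), ih (if p x = true then (0 : Int) + 1 else 0)]
    split_ifs <;> ring

-- ===== VERDICT (by name: the statement is the Claim_ definition above) =====
theorem pair_locks_spec : Claim_equal_pair_locks := by
  intro keys locks _ hpre
  unfold Spec_pair_locks pair_locks pair_locks_alt
  apply PySem.List.foldl_congr_mem
  intro acc key hkey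
  rw [PySem.List.foldl_congr_mem _ _
    (fun acc lock => if pvFitsB key (pvDemands lock) then acc + 1 else acc) acc
    (by intro a lock hlock
        rw [pvMatch_equiv key lock (hpre key hkey lock hlock)])]
  rw [List.foldl_map]
  exact foldl_count_shift (fun lock => pvFitsB key (pvDemands lock)) locks acc
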